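-- pv_equiv track=rewrite | github.com/BurntSushi/fanfoot | fantasy/player.py | group_field_goals
-- ===== SOURCE A (Python) =====
-- def group_field_goals(fgs):
--     """
--     Returns five-tuple of the number of fields goals made and field goals
--     attempt for each of the following field goal lengths: 0-19 yards,
--     20-29 yards, 30-39 yards, 40-49 yards and 50+ yards.
--
--     fgs should be a list of tuples where the first value is the number of
--     yards of the field goal attempt and the second value is whether
--     the attempt was good.
--     """
--     fgs0_19m, fgs20_29m, fgs30_39m, fgs40_49m, fgs50m = 0, 0, 0, 0, 0
--     fgs0_19a, fgs20_29a, fgs30_39a, fgs40_49a, fgs50a = 0, 0, 0, 0, 0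
--     for yards, good in fgs:
--         if yards <= 19:
--             fgs0_19a += 1
--             if good:
--                 fgs0_19m += 1
--         elif yards <= 29:
--             fgs20_29a += 1
--             if good:
--                 fgs20_29m += 1
--         elif yards <= 39:
--             fgs30_39a += 1
--             if good:
--                 fgs30_39m += 1
--         elif yards <= 49:
--             fgs40_49a += 1
--             if good:
--                 fgs40_49m += 1
--         else:
--             fgs50a += 1
--             if good:
--                 fgs50m += 1
--
--     return ((fgs0_19m, fgs0_19a),
--             (fgs20_29m, fgs20_29a),
--             (fgs30_39m, fgs30_39a),
--             (fgs40_49m, fgs40_49a),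
--             (fgs50m, fgs50a))
-- ===== SOURCE B (Python) =====
-- def group_field_goals(fgs):
--     # Cumulative-count formulation: for each threshold t, count attempts and
--     # makes with yards <= t; each bucket is the difference of consecutive
--     # cumulative counts, the last bucket being the totals minus the 49-cumulative.
--     def upto(th):
--         made = sum(1 for y, g in fgs if y <= th and g)
--         att = sum(1 for y, _ in fgs if y <= th)
--         return (made, att)
--     total = (sum(1 for _, g in fgs if g), len(fgs))
--     c = [(0, 0)] + [upto(t) for t in (19, 29, 39, 49)] + [total]
--     return tuple((c[i + 1][0] - c[i][0], c[i + 1][1] - c[i][1]) for i in range(5))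
-- ===== Notes on version B (the rewrite author's own statement) =====
-- stated objective: alternative
-- what changed: Replaces the single-pass five-way branch ladder with staged counting passes: cumulative (made, attempted) counts up to each threshold, each bucket obtained as the difference of consecutive cumulative counts.
import Mathlib
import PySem

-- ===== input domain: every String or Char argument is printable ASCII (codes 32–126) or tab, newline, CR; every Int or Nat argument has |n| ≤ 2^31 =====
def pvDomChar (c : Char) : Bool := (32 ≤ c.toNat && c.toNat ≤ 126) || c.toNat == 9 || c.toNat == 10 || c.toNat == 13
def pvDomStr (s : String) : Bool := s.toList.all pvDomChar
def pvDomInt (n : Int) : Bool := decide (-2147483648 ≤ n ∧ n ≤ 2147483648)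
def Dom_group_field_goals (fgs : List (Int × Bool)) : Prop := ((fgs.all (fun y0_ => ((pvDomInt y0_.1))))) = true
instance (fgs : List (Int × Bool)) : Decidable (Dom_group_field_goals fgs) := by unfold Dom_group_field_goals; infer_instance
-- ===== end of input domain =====

-- B replaces A's single-pass five-way branch ladder by staged counting passes:
-- cumulative (made, attempted) counts up to each threshold, buckets = consecutive differences (alternative).


-- ===== PORT A =====
-- A's loop: ten scalar counters threaded as a flat 10-tuple, branch ladder kept in order.
def pvStepA (s : Int × Int × Int × Int × Int × Int × Int × Int × Int × Int) (p : Int × Bool) :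
    Int × Int × Int × Int × Int × Int × Int × Int × Int × Int :=
  let (m0, m1, m2, m3, m4, a0, a1, a2, a3, a4) := s
  if p.1 ≤ 19 then (if p.2 then m0 + 1 else m0, m1, m2, m3, m4, a0 + 1, a1, a2, a3, a4)
  else if p.1 ≤ 29 then (m0, if p.2 then m1 + 1 else m1, m2, m3, m4, a0, a1 + 1, a2, a3, a4)
  else if p.1 ≤ 39 then (m0, m1, if p.2 then m2 + 1 else m2, m3, m4, a0, a1, a2 + 1, a3, a4)
  else if p.1 ≤ 49 then (m0, m1, m2, if p.2 then m3 + 1 else m3, m4, a0, a1, a2, a3 + 1, a4)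
  else (m0, m1, m2, m3, if p.2 then m4 + 1 else m4, a0, a1, a2, a3, a4 + 1)

def group_field_goals (fgs : List (Int × Bool)) : (Int × Int) × (Int × Int) × (Int × Int) × (Int × Int) × (Int × Int) :=
  let (m0, m1, m2, m3, m4, a0, a1, a2, a3, a4) := fgs.foldl pvStepA (0, 0, 0, 0, 0, 0, 0, 0, 0, 0)
  ((m0, a0), (m1, a1), (m2, a2), (m3, a3), (m4, a4))

-- ===== PORT B =====
-- upto(th): cumulative (made, attempted) counts over the whole list up to threshold th
def pvUpto (fgs : List (Int × Bool)) (th : Int) : Int × Int :=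
  ((fgs.countP (fun p => decide (p.1 ≤ th) && p.2) : Int),
   (fgs.countP (fun p => decide (p.1 ≤ th)) : Int))

def group_field_goals_alt (fgs : List (Int × Bool)) : (Int × Int) × (Int × Int) × (Int × Int) × (Int × Int) × (Int × Int) :=
  let total : Int × Int := ((fgs.countP (fun p => p.2) : Int), (fgs.length : Int))
  let c : List (Int × Int) := (0, 0) :: (([19, 29, 39, 49] : List Int).map (pvUpto fgs) ++ [total])
  let d := fun (i : Nat) =>
    ((c.getD (i + 1) (0, 0)).1 - (c.getD i (0, 0)).1,
     (c.getD (i + 1) (0, 0)).2 - (c.getD i (0, 0)).2)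
  (d 0, d 1, d 2, d 3, d 4)

-- ===== PRECONDITION & SPEC =====
def Spec_group_field_goals (fgs : List (Int × Bool)) (out : (Int × Int) × (Int × Int) × (Int × Int) × (Int × Int) × (Int × Int)) : Prop := out = group_field_goals_alt fgs
instance (fgs : List (Int × Bool)) (out : (Int × Int) × (Int × Int) × (Int × Int) × (Int × Int) × (Int × Int)) : Decidable (Spec_group_field_goals fgs out) := by unfold Spec_group_field_goals; infer_instance

-- ===== CLAIM (what is proved, stated in full; the proofs are below) =====
def Claim_equal_group_field_goals : Prop := ∀ (fgs : List (Int × Bool)), Dom_group_field_goals fgs → Spec_group_field_goals fgs (group_field_goals fgs)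

-- ===== LEMMAS AND PROOFS =====

-- cumulative made/attempted counts as Ints
def pvM (fgs : List (Int × Bool)) (th : Int) : Int := (fgs.countP (fun p => decide (p.1 ≤ th) && p.2) : Int)
def pvA (fgs : List (Int × Bool)) (th : Int) : Int := (fgs.countP (fun p => decide (p.1 ≤ th)) : Int)
def pvMT (fgs : List (Int × Bool)) : Int := (fgs.countP (fun p => p.2) : Int)

-- Invariant: A's fold from any start adds the cumulative-count differences bucket for bucket.
theorem pv_foldA (fgs : List (Int × Bool)) :
    ∀ s : Int × Int × Int × Int × Int × Int × Int × Int × Int × Int,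
    fgs.foldl pvStepA s =
      (s.1 + pvM fgs 19, s.2.1 + (pvM fgs 29 - pvM fgs 19), s.2.2.1 + (pvM fgs 39 - pvM fgs 29),
       s.2.2.2.1 + (pvM fgs 49 - pvM fgs 39), s.2.2.2.2.1 + (pvMT fgs - pvM fgs 49),
       s.2.2.2.2.2.1 + pvA fgs 19, s.2.2.2.2.2.2.1 + (pvA fgs 29 - pvA fgs 19),
       s.2.2.2.2.2.2.2.1 + (pvA fgs 39 - pvA fgs 29),
       s.2.2.2.2.2.2.2.2.1 + (pvA fgs 49 - pvA fgs 39),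
       s.2.2.2.2.2.2.2.2.2 + ((fgs.length : Int) - pvA fgs 49)) := by
  induction fgs with
  | nil => intro s; simp [pvM, pvA, pvMT]
  | cons p rest ih =>
    intro s
    obtain ⟨m0, m1, m2, m3, m4, a0, a1, a2, a3, a4⟩ := s
    rcases p with ⟨y, g⟩
    simp only [List.foldl_cons, ih]
    by_cases h1 : y ≤ 19 <;> by_cases h2 : y ≤ 29 <;> by_cases h3 : y ≤ 39 <;>
      by_cases h4 : y ≤ 49 <;> first | omega |
      (cases g <;>
        simp only [pvStepA, pvM, pvA, pvMT, h1, h2, h3, h4, if_false,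
          List.countP_cons, List.length_cons, decide_true, decide_false,
          Bool.and_true, Bool.and_false, if_pos] <;>
        simp [Prod.ext_iff] <;> omega)

-- ===== VERDICT (by name: the statement is the Claim_ definition above) =====
theorem group_field_goals_spec : Claim_equal_group_field_goals := by
  intro fgs _
  unfold Spec_group_field_goals group_field_goals group_field_goals_alt
  rw [pv_foldA fgs (0, 0, 0, 0, 0, 0, 0, 0, 0, 0)]
  simp [pvUpto, pvM, pvA, pvMT]
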